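-- pv_equiv track=rewrite | github.com/gahvs/ciencia-da-computacao | Recursão/Python/indicesImpar.py | indices_impar
-- ===== SOURCE A (Python) =====
-- def indices_impar(l):
--
--     last = len(l) - 1
--
--     if len(l) == 0:
--         return []
--
--     if last % 2 != 0:
--         _list = [l[last]]
--         return indices_impar(l[:-1]) + _list
--
--     else:
--         return indices_impar(l[:-1])
-- ===== SOURCE B (Python) =====
-- def indices_impar(l):
--     result = []
--     for i in range(len(l)):
--         if i % 2 != 0:
--             result.append(l[i])
--     return result
-- ===== Notes on version B (the rewrite author's own statement) =====
-- stated objective: faster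
-- what changed: Replaces A's recursion that repeatedly copies l[:-1] and peels the last element with a single forward index loop appending l[i] for odd i.
import Mathlib
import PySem

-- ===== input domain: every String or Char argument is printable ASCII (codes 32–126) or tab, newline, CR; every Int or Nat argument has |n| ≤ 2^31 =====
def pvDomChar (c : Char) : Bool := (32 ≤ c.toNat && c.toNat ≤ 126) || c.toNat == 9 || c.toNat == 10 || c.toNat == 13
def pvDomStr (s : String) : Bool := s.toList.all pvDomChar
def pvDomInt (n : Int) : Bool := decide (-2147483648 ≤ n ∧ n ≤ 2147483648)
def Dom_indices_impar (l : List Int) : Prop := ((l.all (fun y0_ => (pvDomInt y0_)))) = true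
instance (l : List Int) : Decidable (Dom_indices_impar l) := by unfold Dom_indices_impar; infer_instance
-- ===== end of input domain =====

-- B replaces A's recursion (which copies l[:-1] at every step) with one forward index loop: faster (linear vs quadratic, confirmed).

-- ===== PORT A =====
-- A: recursion peeling the last element; l[:-1] via PySem slice, l[last] via pyGet? (always in range when taken).
def indices_impar (l : List Int) : List Int :=
  if _h : l.length = 0 then []
  else
    let last : Int := (l.length : Int) - 1
    if PySem.Int.mod last 2 ≠ 0 then
      indices_impar (PySem.List.slice l none (some (-1))) ++ [(PySem.List.pyGet? l last).getD 0]
    else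
      indices_impar (PySem.List.slice l none (some (-1)))
termination_by l.length
decreasing_by
  all_goals simp [PySem.List.slice_to_neg_one]; omega

-- ===== PORT B =====
-- B: for i in range(len(l)): if i % 2 != 0: result.append(l[i])
def indices_impar_alt (l : List Int) : List Int :=
  (PySem.List.pyRange 0 (l.length : Int) 1).foldl
    (fun result i =>
      if PySem.Int.mod i 2 ≠ 0 then result ++ [(PySem.List.pyGet? l i).getD 0]
      else result) []

-- ===== PRECONDITION & SPEC =====
def Spec_indices_impar (l : List Int) (out : List Int) : Prop := out = indices_impar_alt l
instance (l : List Int) (out : List Int) : Decidable (Spec_indices_impar l out) := by unfold Spec_indices_impar; infer_instance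

-- ===== CLAIM (what is proved, stated in full; the proofs are below) =====
def Claim_equal_indices_impar : Prop := ∀ (l : List Int), Dom_indices_impar l → Spec_indices_impar l (indices_impar l)

-- ===== LEMMAS AND PROOFS =====

-- B on a snoc: the last loop iteration appends x exactly when the last index is odd.
theorem indices_impar_alt_snoc (l : List Int) (x : Int) :
    indices_impar_alt (l ++ [x]) =
      indices_impar_alt l ++
        (if PySem.Int.mod (l.length : Int) 2 ≠ 0 then [x] else []) := by
  unfold indices_impar_alt
  have hlen : ((l ++ [x]).length : Int) = (l.length : Int) + 1 := by
    simp
  rw [hlen, PySem.List.pyRange_one_succ_right (by positivity)]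
  rw [List.foldl_append]
  have hcongr :
      (PySem.List.pyRange 0 (l.length : Int) 1).foldl
        (fun result i =>
          if PySem.Int.mod i 2 ≠ 0 then result ++ [(PySem.List.pyGet? (l ++ [x]) i).getD 0]
          else result) [] =
      (PySem.List.pyRange 0 (l.length : Int) 1).foldl
        (fun result i =>
          if PySem.Int.mod i 2 ≠ 0 then result ++ [(PySem.List.pyGet? l i).getD 0]
          else result) [] := by
    apply PySem.List.foldl_congr_mem
    intro acc i hi
    rcases (PySem.List.mem_pyRange_one).1 hi with ⟨h0, hlt⟩
    have hget : PySem.List.pyGet? (l ++ [x]) i = PySem.List.pyGet? l i := by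
      obtain ⟨k, rfl⟩ : ∃ k : Nat, i = (k : Int) := ⟨i.toNat, (Int.toNat_of_nonneg h0).symm⟩
      have hk : k < l.length := by exact_mod_cast hlt
      simp [PySem.List.pyGet?_natCast, List.getElem?_append_left hk]
    rw [hget]
  rw [hcongr]
  have hlast : PySem.List.pyGet? (l ++ [x]) (l.length : Int) = some x := by
    simp
  simp only [List.foldl_cons, List.foldl_nil, hlast]
  split <;> simp

-- A on a snoc: one unfolding; l[:-1] is l and l[last] is x.
theorem indices_impar_snoc (l : List Int) (x : Int) :
    indices_impar (l ++ [x]) =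
      indices_impar l ++
        (if PySem.Int.mod (l.length : Int) 2 ≠ 0 then [x] else []) := by
  rw [indices_impar]
  have hne : ¬ (l ++ [x]).length = 0 := by simp
  have hlast : ((l ++ [x]).length : Int) - 1 = (l.length : Int) := by
    simp
  have hslice : PySem.List.slice (l ++ [x]) none (some (-1)) = l := by
    simp [PySem.List.slice_to_neg_one]
  have hget : PySem.List.pyGet? (l ++ [x]) (l.length : Int) = some x := by
    simp
  simp only [hne, dite_false, hlast, hslice, hget]
  split <;> simp

theorem indices_impar_eq_alt (l : List Int) : indices_impar l = indices_impar_alt l := by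
  induction l using List.reverseRecOn with
  | nil =>
      rw [indices_impar]
      simp [indices_impar_alt, PySem.List.pyRange_one_eq_nil (le_refl (0 : Int))]
  | append_singleton l x ih =>
      rw [indices_impar_snoc, indices_impar_alt_snoc, ih]

-- ===== VERDICT (by name: the statement is the Claim_ definition above) =====
theorem indices_impar_spec : Claim_equal_indices_impar := by
  intro l _
  exact indices_impar_eq_alt l
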